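-- pv_equiv track=rewrite | github.com/gh0stintheshe11/LeetCode-Solutions | solutions/2472.maximum-number-of-non-overlapping-palindrome-substrings/Python3.py | maxPalindromes
-- ===== SOURCE A (Python) =====
-- def maxPalindromes(s: str, k: int) -> int:
--     def is_palindrome(s: str) -> bool:
--         return s == s[::-1]
--
--     n = len(s)
--     dp = [0] * (n + 1)
--
--     for i in range(1, n + 1):
--         dp[i] = dp[i - 1]
--         for j in range(i - k, -1, -1):
--             if is_palindrome(s[j:i]):
--                 dp[i] = max(dp[i], dp[j] + 1)
--                 break
--
--     return dp[n]
-- ===== SOURCE B (Python) =====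
-- def maxPalindromes(s: str, k: int) -> int:
--     # Greedy-free O(n*k) DP: any palindrome of length >= k contains a centred
--     # palindrome of length k or k+1, so only those two lengths need checking,
--     # each with an in-place two-pointer test (no slicing).
--     n = len(s)
--
--     def is_pal(a: int, b: int) -> bool:  # s[a..b] inclusive, two pointers
--         while a < b:
--             if s[a] != s[b]:
--                 return False
--             a += 1
--             b -= 1
--         return True
--
--     dp = [0]
--     for i in range(1, n + 1):
--         best = dp[-1]
--         if k <= i and is_pal(i - k, i - 1):
--             best = max(best, dp[-k] + 1)
--         if k + 1 <= i and is_pal(i - k - 1, i - 1):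
--             best = max(best, dp[-k - 1] + 1)
--         dp.append(best)
--     return dp[-1]
-- ===== Notes on version B (the rewrite author's own statement) =====
-- stated objective: faster
-- what changed: Replaces A's inner scan over every start index j (each with an O(n) slice-reversal palindrome test) by the DP that checks only the two candidate lengths k and k+1 at each end position with an in-place two-pointer character test and Python negative-index lookups, since any palindrome of length >= k contains a centred sub-palindrome of length k or k+1.
import Mathlib
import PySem

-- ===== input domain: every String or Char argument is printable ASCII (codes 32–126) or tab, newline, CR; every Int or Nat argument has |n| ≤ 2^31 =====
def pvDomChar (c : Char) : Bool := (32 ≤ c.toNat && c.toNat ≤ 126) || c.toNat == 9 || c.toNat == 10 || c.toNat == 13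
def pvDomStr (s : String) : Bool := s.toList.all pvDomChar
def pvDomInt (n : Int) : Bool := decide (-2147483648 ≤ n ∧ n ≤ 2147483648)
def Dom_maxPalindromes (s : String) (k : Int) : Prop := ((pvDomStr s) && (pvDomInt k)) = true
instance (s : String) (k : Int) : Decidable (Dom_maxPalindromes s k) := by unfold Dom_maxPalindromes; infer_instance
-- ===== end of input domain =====

-- B replaces A's scan over every start index (each with a slice-reversal palindrome
-- test) by the DP that checks only candidate lengths k and k+1 at each end position,
-- using a two-pointer character test and negative-index lookups (measurably faster).

-- ===== PORT A =====
-- is_palindrome(s): s == s[::-1]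
def pvIsPalin (t : List Char) : Bool :=
  t == (PySem.List.slice? t none none (-1)).getD []

-- inner 'for j in range(i-k, -1, -1): if is_palindrome(s[j:i]): dp[i] = max(dp[i], dp[j]+1); break'
def pvInnerA (l : List Char) (i : Int) (dp : List Int) : List Int → List Int
  | [] => dp
  | j :: rest =>
    if pvIsPalin (PySem.List.slice l (some j) (some i)) then
      dp.set i.toNat (max (PySem.List.pyGetD dp i 0) (PySem.List.pyGetD dp j 0 + 1))
    else pvInnerA l i dp rest

-- outer 'for i in range(1, n+1): dp[i] = dp[i-1]; <inner loop>'
def pvOuterA (l : List Char) (k : Int) (dp : List Int) : List Int → List Int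
  | [] => dp
  | i :: rest =>
    pvOuterA l k
      (pvInnerA l i (dp.set i.toNat (PySem.List.pyGetD dp (i - 1) 0))
        (PySem.List.pyRange (i - k) (-1) (-1)))
      rest

def maxPalindromes (s : String) (k : Int) : Int :=
  let l := s.toList
  let n := l.length
  PySem.List.pyGetD
    (pvOuterA l k (List.replicate (n + 1) 0) (PySem.List.pyRange 1 ((n : Int) + 1) 1))
    (n : Int) 0

-- ===== PORT B =====
-- 'while a < b: if s[a] != s[b]: return False; a += 1; b -= 1; return True'
-- (the getD default is never read: under Pre_ every call keeps a, b inside the string)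
def pvPal2 (l : List Char) (a b : Int) : Bool :=
  if h : a < b then
    if PySem.List.pyGetD l a 'a' ≠ PySem.List.pyGetD l b 'a' then false
    else pvPal2 l (a + 1) (b - 1)
  else true
termination_by (b - a).toNat
decreasing_by omega

-- 'for i in range(1, n+1): best = dp[-1]; two guarded checks; dp.append(best)'
def pvLoopB (l : List Char) (k : Int) (dp : List Int) : List Int → List Int
  | [] => dp
  | i :: rest =>
    let b0 := PySem.List.pyGetD dp (-1) 0
    let b1 := if k ≤ i ∧ pvPal2 l (i - k) (i - 1) = true
              then max b0 (PySem.List.pyGetD dp (-k) 0 + 1) else b0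
    let b2 := if k + 1 ≤ i ∧ pvPal2 l (i - k - 1) (i - 1) = true
              then max b1 (PySem.List.pyGetD dp (-k - 1) 0 + 1) else b1
    pvLoopB l k (dp ++ [b2]) rest

def maxPalindromes_alt (s : String) (k : Int) : Int :=
  let l := s.toList
  let n := l.length
  PySem.List.pyGetD (pvLoopB l k [0] (PySem.List.pyRange 1 ((n : Int) + 1) 1)) (-1) 0

-- ===== PRECONDITION & SPEC =====
-- Pre_ excludes only k < 0 on nonempty s, where A raises IndexError (dp[j] with j > n).
def Pre_maxPalindromes (s : String) (k : Int) : Prop := 0 ≤ k ∨ s = ""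
instance (s : String) (k : Int) : Decidable (Pre_maxPalindromes s k) := by
  unfold Pre_maxPalindromes; infer_instance

def pvWitness_maxPalindromes : String × Int := ("aba", 2)

def Spec_maxPalindromes (s : String) (k : Int) (out : Int) : Prop := out = maxPalindromes_alt s k
instance (s : String) (k : Int) (out : Int) : Decidable (Spec_maxPalindromes s k out) := by
  unfold Spec_maxPalindromes; infer_instance

-- ===== CLAIM (what is proved, stated in full; the proofs are below) =====
def Claim_equal_maxPalindromes : Prop :=
  ∀ (s : String) (k : Int), Dom_maxPalindromes s k → Pre_maxPalindromes s k →
    Spec_maxPalindromes s k (maxPalindromes s k)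

-- ===== LEMMAS AND PROOFS =====

-- Is the slice l[j:i] (Nat bounds) a palindrome?
def PalB (l : List Char) (j i : Nat) : Bool :=
  ((l.drop j).take (i - j)) == ((l.drop j).take (i - j)).reverse

-- the j's A's inner loop visits: i-K, i-K-1, …, 0 (empty when K > i)
def descJ (i K : Nat) : List Nat :=
  if K ≤ i then (List.range (i - K + 1)).reverse else []

-- abstract dp array of A, built index by index
def dpa (l : List Char) (K : Nat) : Nat → List Int
  | 0 => [0]
  | i + 1 =>
    let D := dpa l K i
    let prev := D.getD i 0
    let v := match (descJ (i + 1) K).find? (fun j => PalB l j (i + 1)) with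
             | some j => max prev (D.getD j 0 + 1)
             | none => prev
    D ++ [v]

-- abstract dp array of B
def dpb (l : List Char) (K : Nat) : Nat → List Int
  | 0 => [0]
  | i + 1 =>
    let D := dpb l K i
    let b0 := D.getD i 0
    let b1 := if K ≤ i + 1 ∧ PalB l (i + 1 - K) (i + 1) = true
              then max b0 (D.getD (i + 1 - K) 0 + 1) else b0
    let b2 := if K + 1 ≤ i + 1 ∧ PalB l (i - K) (i + 1) = true
              then max b1 (D.getD (i - K) 0 + 1) else b1
    D ++ [b2]

def aV (l : List Char) (K i : Nat) : Int := (dpa l K i).getD i 0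
def bV (l : List Char) (K i : Nat) : Int := (dpb l K i).getD i 0

theorem length_dpa (l : List Char) (K : Nat) : ∀ i, (dpa l K i).length = i + 1 := by
  intro i
  induction i with
  | zero => rfl
  | succ n ih => simp [dpa, ih]

theorem length_dpb (l : List Char) (K : Nat) : ∀ i, (dpb l K i).length = i + 1 := by
  intro i
  induction i with
  | zero => rfl
  | succ n ih => simp [dpb, ih]

theorem dpa_succ (l : List Char) (K n : Nat) : ∃ v, dpa l K (n + 1) = dpa l K n ++ [v] :=
  ⟨_, rfl⟩

theorem dpb_succ (l : List Char) (K n : Nat) : ∃ v, dpb l K (n + 1) = dpb l K n ++ [v] :=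
  ⟨_, rfl⟩

theorem getD_dpa (l : List Char) (K : Nat) {j i : Nat} (h : j ≤ i) :
    (dpa l K i).getD j 0 = aV l K j := by
  induction i with
  | zero => cases Nat.le_zero.mp h; rfl
  | succ n ih =>
    rcases Nat.eq_or_lt_of_le h with rfl | hlt
    · rfl
    · obtain ⟨v, hv⟩ := dpa_succ l K n
      rw [hv, List.getD_append _ _ _ _ (by rw [length_dpa]; omega)]
      exact ih (by omega)

theorem getD_dpb (l : List Char) (K : Nat) {j i : Nat} (h : j ≤ i) :
    (dpb l K i).getD j 0 = bV l K j := by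
  induction i with
  | zero => cases Nat.le_zero.mp h; rfl
  | succ n ih =>
    rcases Nat.eq_or_lt_of_le h with rfl | hlt
    · rfl
    · obtain ⟨v, hv⟩ := dpb_succ l K n
      rw [hv, List.getD_append _ _ _ _ (by rw [length_dpb]; omega)]
      exact ih (by omega)

theorem getD_last_append {D : List Int} {v : Int} {n : Nat} (h : D.length = n + 1) :
    (D ++ [v]).getD (n + 1) 0 = v := by
  rw [List.getD_append_right _ _ _ _ (by omega)]
  simp [h]

theorem aV_succ_le (l : List Char) (K n : Nat) : aV l K n ≤ aV l K (n + 1) := by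
  show aV l K n ≤ (dpa l K (n + 1)).getD (n + 1) 0
  have hl := length_dpa l K n
  show aV l K n ≤ (dpa l K n ++ [_]).getD (n + 1) 0
  rw [getD_last_append hl]
  have hp : (dpa l K n).getD n 0 = aV l K n := getD_dpa l K le_rfl
  cases h2 : (descJ (n + 1) K).find? (fun j => PalB l j (n + 1)) with
  | none => simp only [hp]; exact le_rfl
  | some j => simp only [hp]; exact le_max_left _ _

theorem aV_mono (l : List Char) (K : Nat) {j i : Nat} (h : j ≤ i) : aV l K j ≤ aV l K i := by
  induction i with
  | zero => cases Nat.le_zero.mp h; exact le_rfl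
  | succ n ih =>
    rcases Nat.eq_or_lt_of_le h with rfl | hlt
    · exact le_rfl
    · exact le_trans (ih (by omega)) (aV_succ_le l K n)

theorem bV_succ_le (l : List Char) (K n : Nat) : bV l K n ≤ bV l K (n + 1) := by
  show bV l K n ≤ (dpb l K (n + 1)).getD (n + 1) 0
  have hl := length_dpb l K n
  show bV l K n ≤ (dpb l K n ++ [_]).getD (n + 1) 0
  rw [getD_last_append hl]
  have hp : (dpb l K n).getD n 0 = bV l K n := getD_dpb l K le_rfl
  rw [hp]
  split_ifs <;> simp

theorem bV_mono (l : List Char) (K : Nat) {j i : Nat} (h : j ≤ i) : bV l K j ≤ bV l K i := by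
  induction i with
  | zero => cases Nat.le_zero.mp h; exact le_rfl
  | succ n ih =>
    rcases Nat.eq_or_lt_of_le h with rfl | hlt
    · exact le_rfl
    · exact le_trans (ih (by omega)) (bV_succ_le l K n)

theorem mem_descJ {i K x : Nat} : x ∈ descJ i K ↔ K ≤ i ∧ x ≤ i - K := by
  unfold descJ
  split_ifs with h <;> simp [h]

theorem descJ_pairwise (i K : Nat) : (descJ i K).Pairwise (· > ·) := by
  unfold descJ
  split_ifs with h
  · exact List.pairwise_reverse.mpr List.pairwise_lt_range
  · exact List.Pairwise.nil

theorem descJ_cons {i K : Nat} (h : K ≤ i) :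
    descJ i K = (i - K) :: (List.range (i - K)).reverse := by
  simp [descJ, h, List.range_succ]

theorem find?_desc_max {p : Nat → Bool} : ∀ {L : List Nat}, L.Pairwise (· > ·) →
    ∀ {j0}, L.find? p = some j0 → ∀ x ∈ L, p x = true → x ≤ j0 := by
  intro L
  induction L with
  | nil => intro _ j0 h; simp at h
  | cons a t ih =>
    intro hp j0 hf x hx hpx
    rcases List.pairwise_cons.mp hp with ⟨ha, ht⟩
    by_cases hpa : p a = true
    · rw [List.find?_cons_of_pos hpa] at hf
      cases hf
      rcases List.mem_cons.mp hx with rfl | hx'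
      · exact le_rfl
      · exact le_of_lt (ha x hx')
    · rw [List.find?_cons_of_neg hpa] at hf
      rcases List.mem_cons.mp hx with rfl | hx'
      · exact absurd hpx hpa
      · exact ih ht hf x hx' hpx

-- palindrome core: stripping both ends of a palindromic list
theorem pal_core {t : List Char} (h : t.reverse = t) :
    (t.tail.dropLast).reverse = t.tail.dropLast := by
  rcases List.eq_nil_or_concat t.tail with h0 | ⟨v, b, hvb⟩
  · simp [h0]
  · rcases t with _ | ⟨a, u⟩
    · simp
    · simp only [List.tail_cons] at hvb
      subst hvb
      rw [List.concat_eq_append] at h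
      simp only [List.reverse_cons, List.reverse_append, List.reverse_nil, List.nil_append,
        List.cons_append] at h
      have hb : b = a := by injection h
      have hv : v.reverse ++ [a] = v ++ [b] := by injection h
      subst hb
      have hvv : v.reverse = v := List.append_inj_left' hv (by simp)
      simp [hvv]

theorem take_dropLast {x : List Char} {m : Nat} (h : m ≤ x.length) :
    (x.take m).dropLast = x.take (m - 1) := by
  rw [List.dropLast_eq_take, List.take_take, List.length_take]
  congr 1
  omega

theorem PalB_strip {l : List Char} {j i : Nat} (hle : i ≤ l.length) (hji : j + 2 ≤ i)
    (h : PalB l j i = true) : PalB l (j + 1) (i - 1) = true := by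
  unfold PalB at h ⊢
  rw [beq_iff_eq] at h ⊢
  set t := (l.drop j).take (i - j) with ht
  have hcore := pal_core h.symm
  have htail : t.tail = (l.drop (j + 1)).take (i - j - 1) := by
    rw [ht, ← List.drop_one, List.drop_take, List.drop_drop]
  have hdl : t.tail.dropLast = (l.drop (j + 1)).take (i - 1 - (j + 1)) := by
    rw [htail, take_dropLast (by simp; omega)]
    congr 1
    omega
  rw [hdl] at hcore
  exact hcore.symm

-- any palindrome of length ≥ K contains a centred sub-palindrome of length K or K+1
theorem PalB_shrink {l : List Char} {K : Nat} (hK : 1 ≤ K) :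
    ∀ (d j i : Nat), i ≤ l.length → i - j = K + d → j ≤ i → PalB l j i = true →
      ∃ m, j + m ≤ i - m ∧ ((i - m) - (j + m) = K ∨ (i - m) - (j + m) = K + 1) ∧
        PalB l (j + m) (i - m) = true ∧ m ≤ d := by
  intro d
  induction d using Nat.strong_induction_on with
  | _ d ih =>
    intro j i hle hdiff hji hp
    by_cases hd : d ≤ 1
    · exact ⟨0, by omega, by omega, by simpa using hp, by omega⟩
    · have h2 : j + 2 ≤ i := by omega
      have hp' := PalB_strip hle h2 hp
      obtain ⟨m, h1, hc, h3, h4⟩ :=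
        ih (d - 2) (by omega) (j + 1) (i - 1) (by omega) (by omega) (by omega) hp'
      refine ⟨m + 1, by omega, by omega, ?_, by omega⟩
      have e1 : j + 1 + m = j + (m + 1) := by omega
      have e2 : i - 1 - m = i - (m + 1) := by omega
      rwa [e1, e2] at h3

theorem aV_succ (l : List Char) (K : Nat) (hK : 1 ≤ K) (n : Nat) :
    aV l K (n + 1) = match (descJ (n + 1) K).find? (fun j => PalB l j (n + 1)) with
      | some j => max (aV l K n) (aV l K j + 1)
      | none => aV l K n := by
  have hl := length_dpa l K n
  show (dpa l K n ++ [_]).getD (n + 1) 0 = _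
  rw [getD_last_append hl]
  cases hfind : (descJ (n + 1) K).find? (fun j => PalB l j (n + 1)) with
  | none => simp only [getD_dpa l K le_rfl]
  | some j =>
    have hj : j ≤ n := by
      have hm := mem_descJ.mp (List.mem_of_find?_eq_some hfind)
      omega
    simp only [getD_dpa l K le_rfl, getD_dpa l K hj]

theorem bV_succ (l : List Char) (K : Nat) (hK : 1 ≤ K) (n : Nat) :
    bV l K (n + 1) =
      (if K + 1 ≤ n + 1 ∧ PalB l (n - K) (n + 1) = true
       then max (if K ≤ n + 1 ∧ PalB l (n + 1 - K) (n + 1) = true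
                 then max (bV l K n) (bV l K (n + 1 - K) + 1) else bV l K n)
                (bV l K (n - K) + 1)
       else (if K ≤ n + 1 ∧ PalB l (n + 1 - K) (n + 1) = true
             then max (bV l K n) (bV l K (n + 1 - K) + 1) else bV l K n)) := by
  have hl := length_dpb l K n
  show (dpb l K n ++ [_]).getD (n + 1) 0 = _
  rw [getD_last_append hl]
  simp only [getD_dpb l K le_rfl, getD_dpb l K (show n + 1 - K ≤ n by omega),
    getD_dpb l K (show n - K ≤ n by omega)]

theorem bV_step1 (l : List Char) (K : Nat) (hK : 1 ≤ K) {n : Nat} (h1 : K ≤ n + 1)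
    (h2 : PalB l (n + 1 - K) (n + 1) = true) : bV l K (n + 1 - K) + 1 ≤ bV l K (n + 1) := by
  rw [bV_succ l K hK n]
  split_ifs with hA hB hB <;> simp_all

theorem bV_step2 (l : List Char) (K : Nat) (hK : 1 ≤ K) {n : Nat} (h1 : K + 1 ≤ n + 1)
    (h2 : PalB l (n - K) (n + 1) = true) : bV l K (n - K) + 1 ≤ bV l K (n + 1) := by
  rw [bV_succ l K hK n]
  split_ifs with hA hB hB <;> simp_all

theorem aV_eq_bV (l : List Char) (K : Nat) (hK : 1 ≤ K) :
    ∀ i, i ≤ l.length → aV l K i = bV l K i := by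
  intro i
  induction i using Nat.strong_induction_on with
  | _ i ih =>
    match i with
    | 0 => intro _; rfl
    | (n + 1) =>
      intro hle
      have ihn : ∀ j, j ≤ n → aV l K j = bV l K j := fun j hj => ih j (by omega) (by omega)
      apply le_antisymm
      · rw [aV_succ l K hK n]
        cases hfind : (descJ (n + 1) K).find? (fun j => PalB l j (n + 1)) with
        | none =>
          show aV l K n ≤ bV l K (n + 1)
          rw [ihn n le_rfl]
          exact bV_mono l K (by omega)
        | some j =>
          show max (aV l K n) (aV l K j + 1) ≤ bV l K (n + 1)
          have hmem := mem_descJ.mp (List.mem_of_find?_eq_some hfind)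
          have hpal := List.find?_some hfind
          have hj : j ≤ n := by omega
          apply max_le
          · rw [ihn n le_rfl]; exact bV_mono l K (by omega)
          · obtain ⟨m, hm1, hm2, hm3, _⟩ :=
              PalB_shrink hK ((n + 1) - j - K) j (n + 1) hle (by omega) (by omega) hpal
            have hstep : bV l K (j + m) + 1 ≤ bV l K (n + 1 - m) := by
              have hnm : n + 1 - m = (n - m) + 1 := by omega
              rcases hm2 with hK2 | hK2
              · have e : (n - m) + 1 - K = j + m := by omega
                have hbs := bV_step1 l K hK (n := n - m) (by omega) (by rw [e, ← hnm]; exact hm3)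
                rw [e] at hbs
                rw [hnm]
                exact hbs
              · have e : (n - m) - K = j + m := by omega
                have hbs := bV_step2 l K hK (n := n - m) (by omega) (by rw [e, ← hnm]; exact hm3)
                rw [e] at hbs
                rw [hnm]
                exact hbs
            calc aV l K j + 1 = bV l K j + 1 := by rw [ihn j hj]
              _ ≤ bV l K (j + m) + 1 := by
                  have := bV_mono l K (show j ≤ j + m by omega); omega
              _ ≤ bV l K (n + 1 - m) := hstep
              _ ≤ bV l K (n + 1) := bV_mono l K (by omega)
      · rw [bV_succ l K hK n]
        have hbase : bV l K n ≤ aV l K (n + 1) := by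
          rw [← ihn n le_rfl]; exact aV_succ_le l K n
        have hcase1 : ∀ (h1 : K ≤ n + 1), PalB l (n + 1 - K) (n + 1) = true →
            bV l K (n + 1 - K) + 1 ≤ aV l K (n + 1) := by
          intro h1 h2
          rw [aV_succ l K hK n, descJ_cons h1,
            List.find?_cons_of_pos (p := fun j => PalB l j (n + 1)) h2]
          rw [← ihn (n + 1 - K) (by omega)]
          exact le_max_right _ _
        have hcase2 : ∀ (h1 : K + 1 ≤ n + 1), PalB l (n - K) (n + 1) = true →
            bV l K (n - K) + 1 ≤ aV l K (n + 1) := by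
          intro h1 h2
          have hmem : (n - K) ∈ descJ (n + 1) K := mem_descJ.mpr ⟨by omega, by omega⟩
          cases hfind : (descJ (n + 1) K).find? (fun j => PalB l j (n + 1)) with
          | none => exact absurd h2 (by simpa using List.find?_eq_none.mp hfind _ hmem)
          | some j0 =>
            have hj0 : n - K ≤ j0 := find?_desc_max (descJ_pairwise _ _) hfind _ hmem h2
            have hj0n : j0 ≤ n := by
              have := mem_descJ.mp (List.mem_of_find?_eq_some hfind); omega
            rw [aV_succ l K hK n, hfind]
            show bV l K (n - K) + 1 ≤ max (aV l K n) (aV l K j0 + 1)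
            have hmono : aV l K (n - K) ≤ aV l K j0 := aV_mono l K hj0
            rw [← ihn _ (by omega)]
            calc aV l K (n - K) + 1 ≤ aV l K j0 + 1 := by omega
              _ ≤ max (aV l K n) (aV l K j0 + 1) := le_max_right _ _
        split_ifs with hA hB hB
        · exact max_le (max_le hbase (hcase1 hB.1 hB.2)) (hcase2 hA.1 hA.2)
        · exact max_le hbase (hcase2 hA.1 hA.2)
        · exact max_le hbase (hcase1 hB.1 hB.2)
        · exact hbase

-- ===== port A = dpa =====

theorem pvIsPalin_slice (l : List Char) (j i : Nat) :
    pvIsPalin (PySem.List.slice l (some (j : Int)) (some (i : Int))) = PalB l j i := by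
  simp only [pvIsPalin, PalB, PySem.List.slice_natCast, PySem.List.slice?_none_none_neg_one,
    Option.getD_some]

theorem pyRange_descJ (i K : Nat) :
    PySem.List.pyRange ((i : Int) - (K : Int)) (-1) (-1) = (descJ i K).map (fun (j : Nat) => (j : Int)) := by
  by_cases h : K ≤ i
  · have e : (i : Int) - (K : Int) = ((i - K : Nat) : Int) := by omega
    rw [e, PySem.List.pyRange_neg_one]
    have e2 : (((i - K : Nat) : Int) - -1).toNat = (i - K) + 1 := by omega
    rw [e2, descJ, if_pos h]
    have hrev : (List.range (i - K + 1)).reverse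
        = (List.range (i - K + 1)).map (fun x => i - K - x) := by
      conv_lhs => rw [List.range_eq_range', List.reverse_range']
      apply List.map_congr_left
      intro x hx
      omega
    rw [hrev, List.map_map]
    apply List.map_congr_left
    intro x hx
    have hx' : x < i - K + 1 := List.mem_range.mp hx
    simp only [Function.comp_apply]
    omega
  · rw [PySem.List.pyRange_neg_one_eq_nil (by omega), descJ, if_neg h]
    rfl

theorem innerA_spec (l : List Char) (i : Nat) (dp : List Int) :
    ∀ (js : List Nat),
    pvInnerA l (i : Int) dp (js.map (fun (j : Nat) => (j : Int))) =
      match js.find? (fun j => PalB l j i) with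
      | some j => dp.set i (max (dp.getD i 0) (dp.getD j 0 + 1))
      | none => dp := by
  intro js
  induction js with
  | nil => rfl
  | cons a t ih =>
    by_cases hp : PalB l a i = true
    · rw [List.map_cons, List.find?_cons_of_pos (p := fun j => PalB l j i) hp]
      simp only [pvInnerA, pvIsPalin_slice, hp, if_true, PySem.List.pyGetD_natCast,
        Int.toNat_natCast]
    · rw [List.map_cons, List.find?_cons_of_neg (p := fun j => PalB l j i) hp]
      simp only [pvInnerA, pvIsPalin_slice, hp, if_false, Bool.false_eq_true]
      exact ih

theorem dpa_succ_none {l : List Char} {K m : Nat}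
    (hfind : (descJ (m + 1) K).find? (fun j => PalB l j (m + 1)) = none) :
    dpa l K (m + 1) = dpa l K m ++ [aV l K m] := by
  simp only [dpa, hfind]
  rfl

theorem dpa_succ_some {l : List Char} {K m j : Nat}
    (hfind : (descJ (m + 1) K).find? (fun j => PalB l j (m + 1)) = some j) :
    dpa l K (m + 1) = dpa l K m ++ [max (aV l K m) ((dpa l K m).getD j 0 + 1)] := by
  simp only [dpa, hfind]
  rfl

theorem outerA_inv (l : List Char) (K : Nat) (hK : 1 ≤ K) :
    ∀ (d m : Nat),
      pvOuterA l (K : Int) (dpa l K m ++ List.replicate d 0)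
          (PySem.List.pyRange ((m : Int) + 1) ((m : Int) + (d : Int) + 1) 1)
        = dpa l K (m + d) := by
  intro d
  induction d with
  | zero =>
    intro m
    rw [PySem.List.pyRange_one_eq_nil (by omega)]
    simp [pvOuterA]
  | succ d ih =>
    intro m
    rw [PySem.List.pyRange_one_cons (by omega)]
    simp only [pvOuterA]
    have hlen := length_dpa l K m
    have e0 : ((m : Int) + 1) = (((m + 1 : Nat)) : Int) := by omega
    rw [e0]
    have e1 : (((m + 1 : Nat)) : Int) - 1 = ((m : Nat) : Int) := by omega
    rw [e1, PySem.List.pyGetD_natCast, List.getD_append _ _ _ _ (by omega),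
      getD_dpa l K le_rfl, Int.toNat_natCast, List.set_append, if_neg (by omega)]
    have e3 : m + 1 - (dpa l K m).length = 0 := by omega
    rw [e3, List.replicate_succ, List.set_cons_zero, pyRange_descJ (m + 1) K,
      innerA_spec l (m + 1) _]
    have hcast : ∀ dpx, pvOuterA l (↑K) dpx
          (PySem.List.pyRange ((((m + 1 : Nat)) : Int) + 1) (((m : Nat) : Int) + (((d + 1 : Nat)) : Int) + 1) 1)
        = pvOuterA l (↑K) dpx
          (PySem.List.pyRange ((((m + 1 : Nat)) : Int) + 1) ((((m + 1 : Nat)) : Int) + ((d : Nat) : Int) + 1) 1) := by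
      intro dpx
      congr 1
      push_cast
      ring
    cases hfind : (descJ (m + 1) K).find? (fun j => PalB l j (m + 1)) with
    | none =>
      show pvOuterA l (↑K) (dpa l K m ++ aV l K m :: List.replicate d 0) _ = _
      have hshape : dpa l K m ++ aV l K m :: List.replicate d (0 : Int)
          = dpa l K (m + 1) ++ List.replicate d 0 := by
        rw [dpa_succ_none hfind]
        simp
      rw [hshape, hcast, ih (m + 1)]
      congr 1
      omega
    | some j =>
      have hj : j ≤ m := by
        have := mem_descJ.mp (List.mem_of_find?_eq_some hfind)
        omega
      show pvOuterA l (↑K)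
          ((dpa l K m ++ aV l K m :: List.replicate d 0).set (m + 1)
            (max ((dpa l K m ++ aV l K m :: List.replicate d 0).getD (m + 1) 0)
              ((dpa l K m ++ aV l K m :: List.replicate d 0).getD j 0 + 1))) _ = _
      have g1 : (dpa l K m ++ aV l K m :: List.replicate d (0 : Int)).getD (m + 1) 0
          = aV l K m := by
        rw [List.getD_append_right _ _ _ _ (by omega)]
        simp [hlen]
      have g2 : (dpa l K m ++ aV l K m :: List.replicate d (0 : Int)).getD j 0
          = (dpa l K m).getD j 0 := List.getD_append _ _ _ _ (by omega)
      rw [g1, g2, List.set_append, if_neg (by omega)]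
      have e4 : m + 1 - (dpa l K m).length = 0 := by omega
      rw [e4, List.set_cons_zero]
      have hshape : dpa l K m ++ max (aV l K m) ((dpa l K m).getD j 0 + 1) :: List.replicate d (0 : Int)
          = dpa l K (m + 1) ++ List.replicate d 0 := by
        rw [dpa_succ_some hfind]
        simp
      rw [hshape, hcast, ih (m + 1)]
      congr 1
      omega

theorem portA_eq (s : String) (k : Int) (hk : 1 ≤ k) :
    maxPalindromes s k = aV s.toList k.toNat s.toList.length := by
  have hkK : ((k.toNat : Nat) : Int) = k := Int.toNat_of_nonneg (by omega)
  show PySem.List.pyGetD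
      (pvOuterA s.toList k (List.replicate (s.toList.length + 1) 0)
        (PySem.List.pyRange 1 ((s.toList.length : Int) + 1) 1))
      (s.toList.length : Int) 0 = _
  rw [← hkK]
  have h0 : List.replicate (s.toList.length + 1) (0 : Int)
      = dpa s.toList k.toNat 0 ++ List.replicate s.toList.length 0 := by
    simp [dpa, List.replicate_succ]
  have h1 : PySem.List.pyRange 1 ((s.toList.length : Int) + 1) 1
      = PySem.List.pyRange (((0 : Nat) : Int) + 1)
          (((0 : Nat) : Int) + (s.toList.length : Int) + 1) 1 := by
    norm_num
  rw [h0, h1, outerA_inv s.toList k.toNat (by omega) s.toList.length 0,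
    PySem.List.pyGetD_natCast]
  show (dpa s.toList k.toNat (0 + s.toList.length)).getD s.toList.length 0 = _
  rw [Nat.zero_add, getD_dpa _ _ le_rfl]
  rw [Int.toNat_natCast]

-- ===== port B: the two-pointer test computes PalB =====

theorem pvPal2_of_not_lt (l : List Char) {a b : Int} (h : ¬ a < b) : pvPal2 l a b = true := by
  rw [pvPal2]
  simp [h]

theorem pvPal2_step (l : List Char) {a b : Int} (h : a < b) :
    pvPal2 l a b =
      if PySem.List.pyGetD l a 'a' ≠ PySem.List.pyGetD l b 'a' then false
      else pvPal2 l (a + 1) (b - 1) := by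
  rw [pvPal2]
  simp [h]

theorem rev_short {t : List Char} (h : t.length ≤ 1) : t.reverse = t := by
  cases t with
  | nil => rfl
  | cons x t' =>
    cases t' with
    | nil => rfl
    | cons y r => simp at h

theorem PalB_short {l : List Char} {j i : Nat} (h : i ≤ j + 1) : PalB l j i = true := by
  unfold PalB
  simp only [beq_iff_eq]
  exact (rev_short (by simp only [List.length_take, List.length_drop]; omega)).symm

theorem PalB_rec {l : List Char} {j i : Nat} (h2 : j + 2 ≤ i) (hle : i ≤ l.length) :
    PalB l j i =
      (decide (l[j]'(by omega) = l[i - 1]'(by omega)) && PalB l (j + 1) (i - 1)) := by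
  have hj : j < l.length := by omega
  have hi : i - 1 < l.length := by omega
  have ht : (l.drop j).take (i - j)
      = l[j] :: (((l.drop (j + 1)).take (i - j - 2)) ++ [l[i - 1]]) := by
    rw [List.drop_eq_getElem_cons hj]
    have e : i - j = (i - j - 1) + 1 := by omega
    rw [e, List.take_succ_cons]
    congr 1
    have e2 : i - j - 1 = (i - j - 2) + 1 := by omega
    rw [e2, List.take_succ]
    congr 1
    have e3 : (l.drop (j + 1))[i - j - 2]? = some (l[i - 1]) := by
      rw [List.getElem?_drop]
      have e4 : j + 1 + (i - j - 2) = i - 1 := by omega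
      rw [e4, List.getElem?_eq_getElem hi]
    rw [e3]
    rfl
  have emid : (i - 1) - (j + 1) = i - j - 2 := by omega
  unfold PalB
  rw [ht, emid]
  set a := l[j]
  set b := l[i - 1]
  set u := (l.drop (j + 1)).take (i - j - 2)
  have hrev : (a :: (u ++ [b])).reverse = b :: (u.reverse ++ [a]) := by
    simp
  rw [hrev]
  apply Bool.eq_iff_iff.mpr
  simp only [beq_iff_eq, Bool.and_eq_true, decide_eq_true_eq, List.cons.injEq]
  constructor
  · rintro ⟨hab, h⟩
    rw [hab] at h
    exact ⟨hab, List.append_inj_left' h (by simp)⟩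
  · rintro ⟨hab, h⟩
    exact ⟨hab, by rw [← h, ← hab]⟩

theorem pvPal2_eq_PalB (l : List Char) (n : Nat) :
    ∀ (j i : Nat), i - j = n → j ≤ i → i ≤ l.length →
      pvPal2 l (j : Int) ((i : Int) - 1) = PalB l j i := by
  induction n using Nat.strong_induction_on with
  | _ n ih =>
    intro j i hn hji hle
    by_cases h2 : j + 2 ≤ i
    · have hlt : (j : Int) < (i : Int) - 1 := by omega
      rw [pvPal2_step l hlt]
      have ei : (i : Int) - 1 = ((i - 1 : Nat) : Int) := by omega
      have hga : PySem.List.pyGetD l (j : Int) 'a' = l[j]'(by omega) := by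
        rw [PySem.List.pyGetD_natCast, List.getD_eq_getElem _ _ (by omega)]
      have hgb : PySem.List.pyGetD l ((i : Int) - 1) 'a' = l[i - 1]'(by omega) := by
        rw [ei, PySem.List.pyGetD_natCast, List.getD_eq_getElem _ _ (by omega)]
      have erec : pvPal2 l ((j : Int) + 1) (((i : Int) - 1) - 1) = PalB l (j + 1) (i - 1) := by
        have ea : (j : Int) + 1 = ((j + 1 : Nat) : Int) := by omega
        have eb : ((i : Int) - 1) - 1 = (((i - 1 : Nat)) : Int) - 1 := by omega
        rw [ea, eb]
        exact ih ((i - 1) - (j + 1)) (by omega) (j + 1) (i - 1) rfl (by omega) (by omega)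
      rw [hga, hgb, erec, PalB_rec h2 hle]
      by_cases hab : l[j]'(by omega) = l[i - 1]'(by omega)
      · simp [hab]
      · simp [hab]
    · rw [pvPal2_of_not_lt l (by omega), PalB_short (by omega)]

-- negative lookups over the dp list

theorem pyGetD_dpb_last (l : List Char) (K m : Nat) :
    PySem.List.pyGetD (dpb l K m) (-1) 0 = bV l K m := by
  have hlen := length_dpb l K m
  have hne : dpb l K m ≠ [] := by
    intro h
    rw [h] at hlen
    simp at hlen
  rw [PySem.List.pyGetD_neg_one _ _ hne, List.getLast_eq_getElem]
  rw [← getD_dpb l K (le_refl m), List.getD_eq_getElem _ _ (by omega)]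
  congr 1
  omega

theorem pyGetD_dpb_neg (l : List Char) (K m t : Nat) (h1 : 1 ≤ t) (h2 : t ≤ m + 1) :
    PySem.List.pyGetD (dpb l K m) (-(t : Int)) 0 = bV l K (m + 1 - t) := by
  have hlen := length_dpb l K m
  rw [PySem.List.pyGetD_neg_natCast _ _ _ (by omega) (by omega)]
  rw [← getD_dpb l K (show m + 1 - t ≤ m by omega), List.getD_eq_getElem _ _ (by omega)]
  congr 1
  omega

-- one step of pvLoopB, for 1 ≤ K, matches dpb's step
theorem loopB_inv (l : List Char) (K : Nat) (hK : 1 ≤ K) :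
    ∀ (d m : Nat), m + d ≤ l.length →
      pvLoopB l (K : Int) (dpb l K m)
          (PySem.List.pyRange ((m : Int) + 1) ((m : Int) + (d : Int) + 1) 1)
        = dpb l K (m + d) := by
  intro d
  induction d with
  | zero =>
    intro m _
    rw [PySem.List.pyRange_one_eq_nil (by omega)]
    simp [pvLoopB]
  | succ d ih =>
    intro m hmd
    rw [PySem.List.pyRange_one_cons (by omega)]
    simp only [pvLoopB]
    have e0 : ((m : Int) + 1) = (((m + 1 : Nat)) : Int) := by omega
    rw [e0, pyGetD_dpb_last l K m]
    have hb1 : (if ((K : Nat) : Int) ≤ (((m + 1 : Nat)) : Int) ∧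
          pvPal2 l ((((m + 1 : Nat)) : Int) - ((K : Nat) : Int)) ((((m + 1 : Nat)) : Int) - 1) = true
        then max (bV l K m) (PySem.List.pyGetD (dpb l K m) (-((K : Nat) : Int)) 0 + 1)
        else bV l K m)
        = (if K ≤ m + 1 ∧ PalB l (m + 1 - K) (m + 1) = true
           then max (bV l K m) (bV l K (m + 1 - K) + 1) else bV l K m) := by
      by_cases hc : K ≤ m + 1
      · have ej : (((m + 1 : Nat)) : Int) - ((K : Nat) : Int) = ((m + 1 - K : Nat) : Int) := by
          omega
        rw [ej, pvPal2_eq_PalB l ((m + 1) - (m + 1 - K)) (m + 1 - K) (m + 1) rfl (by omega)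
          (by omega), pyGetD_dpb_neg l K m K hK hc]
        simp [hc, show ((K : Nat) : Int) ≤ (m : Int) + 1 by omega]
      · have hn1 : ¬(((K : Nat) : Int) ≤ (((m + 1 : Nat)) : Int) ∧
            pvPal2 l ((((m + 1 : Nat)) : Int) - ((K : Nat) : Int)) ((((m + 1 : Nat)) : Int) - 1) = true) := by
          intro hcon
          have : K ≤ m + 1 := by exact_mod_cast hcon.1
          exact hc this
        have hn2 : ¬(K ≤ m + 1 ∧ PalB l (m + 1 - K) (m + 1) = true) := fun hcon => hc hcon.1
        rw [if_neg hn1, if_neg hn2]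
    rw [hb1]
    have hb2 : ∀ (x : Int), (if ((K : Nat) : Int) + 1 ≤ (((m + 1 : Nat)) : Int) ∧
          pvPal2 l ((((m + 1 : Nat)) : Int) - ((K : Nat) : Int) - 1) ((((m + 1 : Nat)) : Int) - 1) = true
        then max x (PySem.List.pyGetD (dpb l K m) (-((K : Nat) : Int) - 1) 0 + 1)
        else x)
        = (if K + 1 ≤ m + 1 ∧ PalB l (m - K) (m + 1) = true
           then max x (bV l K (m - K) + 1) else x) := by
      intro x
      by_cases hc : K + 1 ≤ m + 1
      · have ej : (((m + 1 : Nat)) : Int) - ((K : Nat) : Int) - 1 = ((m - K : Nat) : Int) := by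
          omega
        have ek : -((K : Nat) : Int) - 1 = -(((K + 1 : Nat)) : Int) := by omega
        have em : m + 1 - (K + 1) = m - K := by omega
        rw [ej, pvPal2_eq_PalB l ((m + 1) - (m - K)) (m - K) (m + 1) rfl (by omega)
          (by omega), ek, pyGetD_dpb_neg l K m (K + 1) (by omega) hc, em]
        simp [show K ≤ m by omega, show ((K : Nat) : Int) + 1 ≤ (m : Int) + 1 by omega]
      · have hn1 : ¬(((K : Nat) : Int) + 1 ≤ (((m + 1 : Nat)) : Int) ∧
            pvPal2 l ((((m + 1 : Nat)) : Int) - ((K : Nat) : Int) - 1) ((((m + 1 : Nat)) : Int) - 1) = true) := by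
          intro hcon
          have : ((K : Nat) : Int) + 1 ≤ ((m + 1 : Nat) : Int) := hcon.1
          omega
        have hn2 : ¬(K + 1 ≤ m + 1 ∧ PalB l (m - K) (m + 1) = true) := fun hcon => hc hcon.1
        rw [if_neg hn1, if_neg hn2]
    rw [hb2]
    have hshape : dpb l K m ++
        [(if K + 1 ≤ m + 1 ∧ PalB l (m - K) (m + 1) = true
          then max (if K ≤ m + 1 ∧ PalB l (m + 1 - K) (m + 1) = true
                    then max (bV l K m) (bV l K (m + 1 - K) + 1) else bV l K m)
                   (bV l K (m - K) + 1)
          else (if K ≤ m + 1 ∧ PalB l (m + 1 - K) (m + 1) = true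
                then max (bV l K m) (bV l K (m + 1 - K) + 1) else bV l K m))]
        = dpb l K (m + 1) := by
      have h0 : (dpb l K m).getD m 0 = bV l K m := getD_dpb l K le_rfl
      simp only [dpb, h0, getD_dpb l K (show m + 1 - K ≤ m by omega),
        getD_dpb l K (show m - K ≤ m by omega)]
    rw [hshape]
    have hcast : PySem.List.pyRange ((((m + 1 : Nat)) : Int) + 1)
          (((m : Nat) : Int) + (((d + 1 : Nat)) : Int) + 1) 1
        = PySem.List.pyRange ((((m + 1 : Nat)) : Int) + 1)
          ((((m + 1 : Nat)) : Int) + ((d : Nat) : Int) + 1) 1 := by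
      congr 1
      push_cast
      ring
    rw [hcast, ih (m + 1) (by omega)]
    congr 1
    omega

theorem portB_eq (s : String) (k : Int) (hk : 1 ≤ k) :
    maxPalindromes_alt s k = bV s.toList k.toNat s.toList.length := by
  have hkK : ((k.toNat : Nat) : Int) = k := Int.toNat_of_nonneg (by omega)
  show PySem.List.pyGetD
      (pvLoopB s.toList k [0] (PySem.List.pyRange 1 ((s.toList.length : Int) + 1) 1))
      (-1) 0 = _
  rw [← hkK]
  have h1 : PySem.List.pyRange 1 ((s.toList.length : Int) + 1) 1
      = PySem.List.pyRange (((0 : Nat) : Int) + 1)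
          (((0 : Nat) : Int) + (s.toList.length : Int) + 1) 1 := by
    norm_num
  have h0 : [(0 : Int)] = dpb s.toList k.toNat 0 := rfl
  rw [h1, h0, loopB_inv s.toList k.toNat (by omega) s.toList.length 0 (by omega)]
  rw [show (0 : Nat) + s.toList.length = s.toList.length from Nat.zero_add _]
  exact pyGetD_dpb_last s.toList k.toNat s.toList.length

-- ===== k = 0: both ports build dp[t] = t =====

def nats : Nat → List Int
  | 0 => []
  | m + 1 => nats m ++ [(m : Int)]

theorem length_nats (m : Nat) : (nats m).length = m := by
  induction m with
  | zero => rfl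
  | succ n ih => simp [nats, ih]

theorem nats_succ (m : Nat) : nats (m + 1) = nats m ++ [(m : Int)] := rfl

theorem getD_nats {t m : Nat} (h : t < m) : (nats m).getD t 0 = (t : Int) := by
  induction m with
  | zero => omega
  | succ n ih =>
    rcases Nat.lt_succ_iff_lt_or_eq.mp h with h' | rfl
    · rw [nats_succ, List.getD_append _ _ _ _ (by rw [length_nats]; omega)]
      exact ih h'
    · rw [nats_succ, List.getD_append_right _ _ _ _ (by rw [length_nats])]
      rw [length_nats]
      simp

theorem outerA_zero (l : List Char) :
    ∀ (d m : Nat), m + d = l.length →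
      pvOuterA l 0 (nats (m + 1) ++ List.replicate d 0)
          (PySem.List.pyRange ((m : Int) + 1) ((l.length : Int) + 1) 1)
        = nats (l.length + 1) := by
  intro d
  induction d with
  | zero =>
    intro m hm
    rw [PySem.List.pyRange_one_eq_nil (by omega)]
    have hm' : m = l.length := by omega
    simp only [pvOuterA, List.replicate_zero, List.append_nil, hm']
  | succ d ih =>
    intro m hm
    rw [PySem.List.pyRange_one_cons (by omega)]
    simp only [pvOuterA]
    have e0 : ((m : Int) + 1) = (((m + 1 : Nat)) : Int) := by omega
    rw [e0]
    have e1 : (((m + 1 : Nat)) : Int) - 1 = ((m : Nat) : Int) := by omega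
    rw [e1, PySem.List.pyGetD_natCast,
      List.getD_append _ _ _ _ (by rw [length_nats]; omega), getD_nats (by omega),
      Int.toNat_natCast, List.set_append, if_neg (by rw [length_nats]; omega), length_nats]
    have e3 : m + 1 - (m + 1) = 0 := by omega
    rw [e3, List.replicate_succ, List.set_cons_zero]
    have ez : (((m + 1 : Nat)) : Int) - 0 = (((m + 1 : Nat)) : Int) - ((0 : Nat) : Int) := by
      norm_num
    rw [ez, pyRange_descJ (m + 1) 0, innerA_spec l (m + 1) _]
    have hfind : (descJ (m + 1) 0).find? (fun j => PalB l j (m + 1)) = some (m + 1) := by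
      rw [descJ_cons (Nat.zero_le _),
        List.find?_cons_of_pos (p := fun j => PalB l j (m + 1)) (PalB_short (by omega))]
      simp
    rw [hfind]
    show pvOuterA l 0
        ((nats (m + 1) ++ (m : Int) :: List.replicate d 0).set (m + 1)
          (max ((nats (m + 1) ++ (m : Int) :: List.replicate d 0).getD (m + 1) 0)
            ((nats (m + 1) ++ (m : Int) :: List.replicate d 0).getD (m + 1) 0 + 1)))
        (PySem.List.pyRange ((((m + 1 : Nat)) : Int) + 1) ((l.length : Int) + 1) 1)
      = nats (l.length + 1)
    have g1 : (nats (m + 1) ++ (m : Int) :: List.replicate d (0 : Int)).getD (m + 1) 0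
        = (m : Int) := by
      rw [List.getD_append_right _ _ _ _ (by rw [length_nats]), length_nats]
      simp
    rw [g1, List.set_append, if_neg (by rw [length_nats]; omega), length_nats]
    have e6 : m + 1 - (m + 1) = 0 := by omega
    rw [e6, List.set_cons_zero]
    have hmax : max (m : Int) ((m : Int) + 1) = (((m + 1 : Nat)) : Int) := by
      rw [max_eq_right (by omega)]
      omega
    rw [hmax]
    have hshape : nats (m + 1) ++ (((m + 1 : Nat)) : Int) :: List.replicate d (0 : Int)
        = nats (m + 2) ++ List.replicate d 0 := by
      rw [nats_succ (m + 1)]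
      simp
    rw [hshape]
    exact ih (m + 1) (by omega)

theorem loopB_zero (l : List Char) :
    ∀ (d m : Nat), m + d = l.length →
      pvLoopB l 0 (nats (m + 1))
          (PySem.List.pyRange ((m : Int) + 1) ((l.length : Int) + 1) 1)
        = nats (l.length + 1) := by
  intro d
  induction d with
  | zero =>
    intro m hm
    rw [PySem.List.pyRange_one_eq_nil (by omega)]
    have hm' : m = l.length := by omega
    simp only [pvLoopB, hm']
  | succ d ih =>
    intro m hm
    rw [PySem.List.pyRange_one_cons (by omega)]
    simp only [pvLoopB]
    have hlast : PySem.List.pyGetD (nats (m + 1)) (-1) 0 = (m : Int) := by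
      rw [nats_succ m]
      exact PySem.List.pyGetD_neg_one_append_singleton _ _ _
    have hzero : PySem.List.pyGetD (nats (m + 1)) (-0) 0 = 0 := by
      rw [show (-(0 : Int)) = ((0 : Nat) : Int) by norm_num, PySem.List.pyGetD_natCast,
        getD_nats (by omega)]
      norm_num
    have hc1 : ((0 : Int) ≤ (m : Int) + 1 ∧
        pvPal2 l ((m : Int) + 1 - 0) ((m : Int) + 1 - 1) = true) := by
      refine ⟨by omega, ?_⟩
      exact pvPal2_of_not_lt l (by omega)
    have hc2 : ((0 : Int) + 1 ≤ (m : Int) + 1 ∧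
        pvPal2 l ((m : Int) + 1 - 0 - 1) ((m : Int) + 1 - 1) = true) := by
      refine ⟨by omega, ?_⟩
      exact pvPal2_of_not_lt l (by omega)
    rw [hlast, if_pos hc1, hzero, if_pos hc2]
    have hneg1 : PySem.List.pyGetD (nats (m + 1)) (-0 - 1) 0 = (m : Int) := by
      rw [show (-(0 : Int) - 1) = (-1 : Int) by norm_num, nats_succ m]
      exact PySem.List.pyGetD_neg_one_append_singleton _ _ _
    rw [hneg1]
    have hmax : max (max (m : Int) (0 + 1)) ((m : Int) + 1) = ((m : Int) + 1) := by
      rw [max_eq_right]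
      exact max_le (by omega) (by omega)
    rw [hmax]
    have hshape : nats (m + 1) ++ [(m : Int) + 1] = nats (m + 2) := by
      rw [nats_succ (m + 1)]
      norm_num
    rw [hshape]
    have e0 : ((m : Int) + 1) + 1 = (((m + 1 : Nat)) : Int) + 1 := by omega
    rw [e0]
    exact ih (m + 1) (by omega)

theorem portA_zero (s : String) : maxPalindromes s 0 = (s.toList.length : Int) := by
  show PySem.List.pyGetD
      (pvOuterA s.toList 0 (List.replicate (s.toList.length + 1) 0)
        (PySem.List.pyRange 1 ((s.toList.length : Int) + 1) 1))
      (s.toList.length : Int) 0 = _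
  have h0 : List.replicate (s.toList.length + 1) (0 : Int)
      = nats (0 + 1) ++ List.replicate s.toList.length 0 := by
    simp [nats, List.replicate_succ]
  have h1 : PySem.List.pyRange 1 ((s.toList.length : Int) + 1) 1
      = PySem.List.pyRange (((0 : Nat) : Int) + 1) ((s.toList.length : Int) + 1) 1 := by
    norm_num
  rw [h0, h1, outerA_zero s.toList s.toList.length 0 (by omega),
    PySem.List.pyGetD_natCast, getD_nats (by omega)]

theorem portB_zero (s : String) : maxPalindromes_alt s 0 = (s.toList.length : Int) := by
  show PySem.List.pyGetD
      (pvLoopB s.toList 0 [0] (PySem.List.pyRange 1 ((s.toList.length : Int) + 1) 1))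
      (-1) 0 = _
  have h0 : [(0 : Int)] = nats (0 + 1) := by simp [nats]
  have h1 : PySem.List.pyRange 1 ((s.toList.length : Int) + 1) 1
      = PySem.List.pyRange (((0 : Nat) : Int) + 1) ((s.toList.length : Int) + 1) 1 := by
    norm_num
  rw [h0, h1, loopB_zero s.toList s.toList.length 0 (by omega),
    nats_succ s.toList.length, PySem.List.pyGetD_neg_one_append_singleton]

-- ===== VERDICT (by name: the statement is the Claim_ definition above) =====
theorem maxPalindromes_spec : Claim_equal_maxPalindromes := by
  intro s k _hdom hpre
  unfold Spec_maxPalindromes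
  by_cases hs : s = ""
  · subst hs
    show PySem.List.pyGetD (pvOuterA [] k (List.replicate (0 + 1) 0)
        (PySem.List.pyRange 1 (((0 : Nat) : Int) + 1) 1)) ((0 : Nat) : Int) 0
      = PySem.List.pyGetD (pvLoopB [] k [0]
        (PySem.List.pyRange 1 (((0 : Nat) : Int) + 1) 1)) (-1) 0
    rw [PySem.List.pyRange_one_eq_nil (by omega)]
    rfl
  · have hk : 0 ≤ k := by
      rcases hpre with hk | hs'
      · exact hk
      · exact absurd hs' hs
    rcases lt_or_eq_of_le hk with hk1 | hk0
    · rw [portA_eq s k (by omega), portB_eq s k (by omega)]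
      exact aV_eq_bV s.toList k.toNat (by omega) _ le_rfl
    · rw [← hk0, portA_zero, portB_zero]
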